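-- pv_equiv track=rewrite | github.com/Enio-Telles/audit_react | src/utilitarios/dossie_section_builder.py | _combinar_contatos_por_fonte
-- ===== SOURCE A (Python) =====
-- def _normalizar_texto(valor: object) -> str | None:
--     if valor is None:
--         return None
--     texto = str(valor).strip()
--     return texto or None
--
-- def _combinar_contatos_por_fonte(
--     contatos_a: object,
--     contatos_b: object,
-- ) -> dict[str, list[str]]:
--     resultado: dict[str, list[str]] = {}
--     for bloco in (contatos_a, contatos_b):
--         if not isinstance(bloco, dict):
--             continue
--         for origem, valores in bloco.items():
--             lista_atual = resultado.setdefault(str(origem), [])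
--             for valor in valores if isinstance(valores, list) else []:
--                 valor_limpo = _normalizar_texto(valor)
--                 if valor_limpo and valor_limpo not in lista_atual:
--                     lista_atual.append(valor_limpo)
--     return resultado
-- ===== SOURCE B (Python) =====
-- def _normalizar_texto(valor: object) -> str | None:
--     if valor is None:
--         return None
--     texto = str(valor).strip()
--     return texto or None
--
--
-- def _combinar_contatos_por_fonte(
--     contatos_a: object,
--     contatos_b: object,
-- ) -> dict[str, list[str]]:
--     # Pass 1: build the raw merged table (no cleaning, no dedup).
--     # A source whose values are not a list still gets its (possibly empty) entry.
--     bruto: dict[str, list[str]] = {}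
--     for bloco in (contatos_a, contatos_b):
--         if not isinstance(bloco, dict):
--             continue
--         for origem, valores in bloco.items():
--             chave = str(origem)
--             bruto[chave] = bruto.get(chave, []) + (
--                 valores if isinstance(valores, list) else []
--             )
--     # Pass 2: clean every value, drop the empty ones, dedup keeping first occurrences.
--     return {
--         origem: list(
--             dict.fromkeys(t for t in map(_normalizar_texto, valores) if t)
--         )
--         for origem, valores in bruto.items()
--     }
-- ===== Notes on version B (the rewrite author's own statement) =====
-- stated objective: alternative
-- what changed: A merges, cleans and dedups in one inline nested loop mutating each dict entry in place; B first builds a raw merged table with plain list concatenation and then, in a separate pass, rewrites every entry with a dict-comprehension that cleans, filters and dedups via dict.fromkeys.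
import Mathlib
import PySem

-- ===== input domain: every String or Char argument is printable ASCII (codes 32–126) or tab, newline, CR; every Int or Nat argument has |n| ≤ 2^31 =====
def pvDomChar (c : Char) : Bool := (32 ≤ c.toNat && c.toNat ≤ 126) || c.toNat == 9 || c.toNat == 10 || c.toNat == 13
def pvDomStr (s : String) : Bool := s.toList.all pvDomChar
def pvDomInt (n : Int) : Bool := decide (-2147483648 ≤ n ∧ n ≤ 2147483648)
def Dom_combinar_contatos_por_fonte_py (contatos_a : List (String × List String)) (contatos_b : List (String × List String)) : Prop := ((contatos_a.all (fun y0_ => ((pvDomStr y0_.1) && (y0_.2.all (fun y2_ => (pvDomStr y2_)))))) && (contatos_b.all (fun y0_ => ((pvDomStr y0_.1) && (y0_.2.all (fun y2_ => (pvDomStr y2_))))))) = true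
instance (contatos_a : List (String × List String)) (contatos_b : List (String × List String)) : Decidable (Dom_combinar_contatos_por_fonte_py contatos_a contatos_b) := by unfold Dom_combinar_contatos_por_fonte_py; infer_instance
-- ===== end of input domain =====

-- B replaces A's single inline merge-clean-dedup loop by two separate passes (raw merge
-- table, then a per-entry clean/filter/dedup rewrite); same result, 'alternative' objective.
-- Under the type convention both arguments are dicts and all values are lists of strings,
-- so Python's `isinstance` guards and `str(...)` conversions are identities here.

-- ===== PORT A =====
-- _normalizar_texto: valor is a str here (never None), so str(valor) is valor
def pvNormalizar (valor : String) : Option String :=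
  let texto := PySem.Str.strip valor
  if texto = "" then none else some texto

-- body of A's innermost `for valor in valores` loop, acting on lista_atual
def pvStepValorA (lista : List String) (valor : String) : List String :=
  match pvNormalizar valor with
  | none => lista
  | some valor_limpo => if lista.contains valor_limpo then lista else lista ++ [valor_limpo]

-- `for bloco in (a, b): for origem, valores in bloco.items(): …` = one fold over a ++ b;
-- setdefault-then-mutate-in-place equals insert of the updated list at the same position.
def combinar_contatos_por_fonte_py (contatos_a : List (String × List String)) (contatos_b : List (String × List String)) : List (String × List String) :=
  ((contatos_a ++ contatos_b).foldl
    (fun (resultado : PySem.Dict String (List String)) p =>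
      resultado.insert p.1 (p.2.foldl pvStepValorA (resultado.getD p.1 [])))
    PySem.Dict.empty).items

-- ===== PORT B =====
-- pass 1: bruto[chave] = bruto.get(chave, []) + valores
def pvStepBruto (bruto : PySem.Dict String (List String)) (p : String × List String) : PySem.Dict String (List String) :=
  bruto.insert p.1 (bruto.getD p.1 [] ++ p.2)

-- pass 2 per entry: list(dict.fromkeys(t for t in map(_normalizar_texto, valores) if t));
-- dict.fromkeys as ordered dedup is PySem.List.dedup, the generator filter is filterMap
def pvLimpar (valores : List String) : List String :=
  PySem.List.dedup (valores.filterMap pvNormalizar)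

-- the dict comprehension runs over bruto.items() whose keys are distinct, so it is
-- exactly a map over the items (fresh distinct keys insert in order)
def combinar_contatos_por_fonte_py_alt (contatos_a : List (String × List String)) (contatos_b : List (String × List String)) : List (String × List String) :=
  let bruto := (contatos_a ++ contatos_b).foldl pvStepBruto PySem.Dict.empty
  bruto.items.map (fun p => (p.1, pvLimpar p.2))

-- ===== PRECONDITION & SPEC =====
def Spec_combinar_contatos_por_fonte_py (contatos_a : List (String × List String)) (contatos_b : List (String × List String)) (out : List (String × List String)) : Prop := out = combinar_contatos_por_fonte_py_alt contatos_a contatos_b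
instance (contatos_a : List (String × List String)) (contatos_b : List (String × List String)) (out : List (String × List String)) : Decidable (Spec_combinar_contatos_por_fonte_py contatos_a contatos_b out) := by unfold Spec_combinar_contatos_por_fonte_py; infer_instance

-- ===== CLAIM (what is proved, stated in full; the proofs are below) =====
def Claim_equal_combinar_contatos_por_fonte_py : Prop := ∀ (contatos_a : List (String × List String)) (contatos_b : List (String × List String)), Dom_combinar_contatos_por_fonte_py contatos_a contatos_b → Spec_combinar_contatos_por_fonte_py contatos_a contatos_b (combinar_contatos_por_fonte_py contatos_a contatos_b)

-- ===== LEMMAS AND PROOFS =====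

-- map B's "clean every entry" pass over a whole dict
def pvT (d : PySem.Dict String (List String)) : PySem.Dict String (List String) :=
  PySem.Dict.mk (d.items.map (fun p => (p.1, pvLimpar p.2)))

theorem pvT_getD (d : PySem.Dict String (List String)) (k : String) :
    (pvT d).getD k [] = pvLimpar (d.getD k []) := by
  obtain ⟨l⟩ := d
  induction l with
  | nil => rfl
  | cons p rest ih =>
    simp only [pvT, PySem.Dict.getD, PySem.Dict.get?, PySem.Dict.items, List.map_cons,
      List.find?_cons] at *
    by_cases h : p.1 == k
    · simp [h]
    · simp only [h] at *; simpa using ih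

theorem pvT_contains (d : PySem.Dict String (List String)) (k : String) :
    (pvT d).contains k = d.contains k := by
  obtain ⟨l⟩ := d
  induction l with
  | nil => rfl
  | cons p rest ih =>
    simp only [pvT, PySem.Dict.contains, PySem.Dict.items, List.map_cons, List.any_cons] at *
    by_cases h : p.1 == k <;> simp_all

theorem pvT_insert (d : PySem.Dict String (List String)) (k : String) (w : List String) :
    pvT (d.insert k w) = (pvT d).insert k (pvLimpar w) := by
  by_cases h : d.contains k
  · rw [PySem.Dict.insert, if_pos h, PySem.Dict.insert, if_pos (by rw [pvT_contains]; exact h)]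
    simp only [pvT, PySem.Dict.items, List.map_map]
    congr 1
    apply List.map_congr_left
    intro p _
    by_cases hp : p.1 = k <;> simp [hp]
  · rw [PySem.Dict.insert, if_neg h, PySem.Dict.insert,
      if_neg (by rw [pvT_contains]; exact h)]
    simp [pvT]

-- A's inner loop from a cleaned accumulator = Set.update by the cleaned new values
theorem pvInner_eq_update (vs : List String) (s : List String) :
    vs.foldl pvStepValorA s = PySem.Set.update s (vs.filterMap pvNormalizar) := by
  induction vs generalizing s with
  | nil => rfl
  | cons v rest ih =>
    simp only [List.foldl_cons, List.filterMap_cons]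
    cases hv : pvNormalizar v with
    | none => simpa [pvStepValorA, hv] using ih _
    | some c =>
      rw [PySem.Set.update_cons]
      have : pvStepValorA s v = PySem.Set.add s c := by
        simp [pvStepValorA, hv, PySem.Set.add]
      rw [this]; exact ih _

theorem pvInner_eq_limpar (vs cur : List String) :
    vs.foldl pvStepValorA (pvLimpar cur) = pvLimpar (cur ++ vs) := by
  rw [pvInner_eq_update]
  simp only [pvLimpar, PySem.List.dedup_eq_ofList, List.filterMap_append,
    PySem.Set.ofList_append]

-- main invariant: A's fold over the transformed dict tracks B's raw fold
theorem pvMain (ps : List (String × List String)) (d : PySem.Dict String (List String)) :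
    ps.foldl
      (fun (resultado : PySem.Dict String (List String)) p =>
        resultado.insert p.1 (p.2.foldl pvStepValorA (resultado.getD p.1 [])))
      (pvT d)
    = pvT (ps.foldl pvStepBruto d) := by
  induction ps generalizing d with
  | nil => rfl
  | cons p rest ih =>
    simp only [List.foldl_cons]
    rw [pvT_getD, pvInner_eq_limpar, ← pvT_insert]
    exact ih _

-- ===== VERDICT (by name: the statement is the Claim_ definition above) =====
theorem combinar_contatos_por_fonte_py_spec : Claim_equal_combinar_contatos_por_fonte_py := by
  intro a b _
  show combinar_contatos_por_fonte_py a b = combinar_contatos_por_fonte_py_alt a b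
  unfold combinar_contatos_por_fonte_py combinar_contatos_por_fonte_py_alt
  have h := pvMain (a ++ b) PySem.Dict.empty
  have he : pvT PySem.Dict.empty = PySem.Dict.empty := rfl
  rw [he] at h
  rw [h]
  rfl
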